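-- pv_equiv track=rewrite | github.com/sc19y5l/MSc-project-Leeds | 8-hypotheses_validation.py | _is_valid_action_query
-- ===== SOURCE A (Python) =====
-- def _is_valid_action_query(tree):
--     action_valid = 0
--     query_valid = 0  # make sure every query is valid
--     # this makes sure that only one action exist in the tree
--     actions = 0
--     for query in tree:
--         for item in query:
--             if 'actions_' in item:
--                 actions += 1
--                 break
-- # this part makes little sense, it seems some of it is unnecessary
--     if actions == 1:
--         for query in tree:
--             actions = 0
--             for item in query:
--                 if 'actions_' in item:
--                     actions += 1
--             if actions == 0:
--                 query_valid += 1
--             if actions > 0 and len(query) == actions: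
--                 # print '>>>>>>>>>>>',query,actions
--                 query_valid += 1
--         if query_valid == len(tree):
--             # print tree
--             # print '----------------------'
--             action_valid = 1
--     return action_valid
-- ===== SOURCE B (Python) =====
-- def _is_valid_action_query(tree):
--     # Single pass: count queries containing an action and check each query is
--     # all-action or no-action; valid iff exactly one action query and all pure.
--     queries_with_action = 0
--     all_pure = True
--     for query in tree:
--         action_count = sum(1 for item in query if 'actions_' in item)
--         if action_count > 0:
--             queries_with_action += 1
--         if 0 < action_count < len(query):
--             all_pure = False
--     return 1 if queries_with_action == 1 and all_pure else 0
-- ===== Notes on version B (the rewrite author's own statement) =====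
-- stated objective: simpler
-- what changed: Replaces A's two sequential passes (a break-scan counting action queries, then a recount pass comparing a validity counter to len(tree)) with one pass that keeps a query-with-action counter and an all-pure boolean flag per query.
import Mathlib
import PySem

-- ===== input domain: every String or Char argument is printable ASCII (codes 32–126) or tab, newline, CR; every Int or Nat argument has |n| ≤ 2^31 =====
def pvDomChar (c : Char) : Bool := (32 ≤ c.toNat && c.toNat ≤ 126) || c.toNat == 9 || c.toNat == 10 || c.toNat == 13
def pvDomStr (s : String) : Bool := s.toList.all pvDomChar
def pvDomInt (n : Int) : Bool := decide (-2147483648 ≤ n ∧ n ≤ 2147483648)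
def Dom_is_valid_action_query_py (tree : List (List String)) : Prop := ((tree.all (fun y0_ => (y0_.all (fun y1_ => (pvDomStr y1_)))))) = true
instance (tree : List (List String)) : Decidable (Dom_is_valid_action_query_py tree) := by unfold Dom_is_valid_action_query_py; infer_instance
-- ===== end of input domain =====

-- B replaces A's two sequential passes over the tree with a single pass keeping
-- a queries-with-action counter and an all-pure flag (simpler decomposition, same cost).


-- ===== PORT A =====
-- first loop's inner scan: 'for item in query: if 'actions_' in item: actions += 1; break'
def aBreakScan : List String → Int → Int
  | [], acc => acc
  | item :: rest, acc =>
      if PySem.Str.isIn "actions_" item then acc + 1 else aBreakScan rest acc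

-- second loop's inner scan: per-query 'actions' recount, no break
def aInnerCount (query : List String) : Int :=
  query.foldl (fun c item => if PySem.Str.isIn "actions_" item then c + 1 else c) 0

def is_valid_action_query_py (tree : List (List String)) : Int :=
  let actions : Int := tree.foldl (fun acc query => aBreakScan query acc) 0
  if actions = 1 then
    let query_valid : Int := tree.foldl (fun qv query =>
      let c := aInnerCount query
      let qv := if c = 0 then qv + 1 else qv
      if c > 0 ∧ (query.length : Int) = c then qv + 1 else qv) 0
    if query_valid = (tree.length : Int) then 1 else 0
  else 0

-- ===== PORT B =====
-- action_count = sum(1 for item in query if 'actions_' in item)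
def bActionCount (query : List String) : Int :=
  query.foldl (fun c item => if PySem.Str.isIn "actions_" item then c + 1 else c) 0

def is_valid_action_query_py_alt (tree : List (List String)) : Int :=
  let st := tree.foldl (fun (st : Int × Bool) query =>
    let c := bActionCount query
    let qwa := if c > 0 then st.1 + 1 else st.1
    let pure := if 0 < c ∧ c < (query.length : Int) then false else st.2
    (qwa, pure)) ((0 : Int), true)
  if st.1 = 1 ∧ st.2 = true then 1 else 0

-- ===== PRECONDITION & SPEC =====
def Spec_is_valid_action_query_py (tree : List (List String)) (out : Int) : Prop := out = is_valid_action_query_py_alt tree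
instance (tree : List (List String)) (out : Int) : Decidable (Spec_is_valid_action_query_py tree out) := by unfold Spec_is_valid_action_query_py; infer_instance

-- ===== CLAIM (what is proved, stated in full; the proofs are below) =====
def Claim_equal_is_valid_action_query_py : Prop := ∀ (tree : List (List String)), Dom_is_valid_action_query_py tree → Spec_is_valid_action_query_py tree (is_valid_action_query_py tree)

-- ===== LEMMAS AND PROOFS =====

-- whether a query contains an action item
def hasAct (query : List String) : Bool := query.any (fun item => PySem.Str.isIn "actions_" item)

lemma aBreakScan_eq (q : List String) (acc : Int) :
    aBreakScan q acc = acc + (if hasAct q then 1 else 0) := by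
  induction q generalizing acc with
  | nil => simp [aBreakScan, hasAct]
  | cons h t ih =>
      simp only [aBreakScan, hasAct, List.any_cons, Bool.or_eq_true]
      by_cases hp : PySem.Str.isIn "actions_" h = true
      · rw [if_pos hp, if_pos (Or.inl hp)]
      · have hf : PySem.Str.isIn "actions_" h = false := by
          rwa [Bool.not_eq_true] at hp
        rw [if_neg hp, ih]
        have : (PySem.Str.isIn "actions_" h = true ∨ (t.any fun item => PySem.Str.isIn "actions_" item) = true) ↔ hasAct t = true := by
          unfold hasAct; tauto
        rw [if_congr this rfl rfl]

lemma count_shift (q : List String) (acc : Int) :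
    q.foldl (fun c item => if PySem.Str.isIn "actions_" item then c + 1 else c) acc
      = acc + aInnerCount q := by
  induction q generalizing acc with
  | nil => simp [aInnerCount]
  | cons h t ih =>
      simp only [aInnerCount, List.foldl_cons]
      by_cases hp : PySem.Str.isIn "actions_" h = true
      · rw [if_pos hp, if_pos hp, ih, ih (0 + 1)]; ring
      · rw [if_neg hp, if_neg hp, ih]; rfl

lemma count_nonneg (q : List String) : 0 ≤ aInnerCount q := by
  induction q with
  | nil => simp [aInnerCount]
  | cons h t ih =>
      show 0 ≤ (h :: t).foldl _ 0
      rw [List.foldl_cons, count_shift]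
      split <;> omega

lemma count_le_len (q : List String) : aInnerCount q ≤ (q.length : Int) := by
  induction q with
  | nil => simp [aInnerCount]
  | cons h t ih =>
      show (h :: t).foldl _ 0 ≤ ((h :: t).length : Int)
      rw [List.foldl_cons, count_shift, List.length_cons]
      push_cast
      split <;> omega

lemma count_pos_iff (q : List String) : 0 < aInnerCount q ↔ hasAct q = true := by
  induction q with
  | nil => simp [aInnerCount, hasAct]
  | cons h t ih =>
      have hnn := count_nonneg t
      constructor
      · intro hlt
        rw [show aInnerCount (h :: t) = (h :: t).foldl (fun c item => if PySem.Str.isIn "actions_" item then c + 1 else c) 0 from rfl,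
            List.foldl_cons, count_shift] at hlt
        simp only [hasAct, List.any_cons, Bool.or_eq_true]
        by_cases hp : PySem.Str.isIn "actions_" h = true
        · exact Or.inl hp
        · rw [if_neg hp] at hlt
          exact Or.inr (ih.mp (by omega))
      · intro ha
        rw [show aInnerCount (h :: t) = (h :: t).foldl (fun c item => if PySem.Str.isIn "actions_" item then c + 1 else c) 0 from rfl,
            List.foldl_cons, count_shift]
        simp only [hasAct, List.any_cons, Bool.or_eq_true] at ha
        by_cases hp : PySem.Str.isIn "actions_" h = true
        · rw [if_pos hp]; omega
        · rw [if_neg hp]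
          rcases ha with ha | ha
          · exact absurd ha hp
          · have := ih.mpr ha; omega

-- a query is "pure": no action items or all action items
def pureQ (q : List String) : Bool := decide (aInnerCount q = 0 ∨ aInnerCount q = (q.length : Int))

-- A's first fold counts the queries containing an action
lemma first_fold_eq (tree : List (List String)) (acc : Int) :
    tree.foldl (fun acc query => aBreakScan query acc) acc
      = acc + ((tree.filter hasAct).length : Int) := by
  induction tree generalizing acc with
  | nil => simp
  | cons q t ih =>
      simp only [List.foldl_cons, List.filter_cons]
      rw [aBreakScan_eq, ih]
      by_cases h : hasAct q = true
      · rw [if_pos h, if_pos h, List.length_cons]; push_cast; ring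
      · rw [if_neg h, if_neg h]; ring

-- A's second fold counts the pure queries
lemma second_fold_eq (tree : List (List String)) (acc : Int) :
    tree.foldl (fun qv query =>
      let c := aInnerCount query
      let qv := if c = 0 then qv + 1 else qv
      if c > 0 ∧ (query.length : Int) = c then qv + 1 else qv) acc
      = acc + ((tree.filter pureQ).length : Int) := by
  induction tree generalizing acc with
  | nil => simp
  | cons q t ih =>
      simp only [List.foldl_cons, List.filter_cons]
      have h0 := count_nonneg q
      by_cases hz : aInnerCount q = 0
      · have hp : pureQ q = true := by simp [pureQ, hz]
        rw [if_pos hz, if_neg (by rw [hz]; omega), ih, hp, if_pos rfl, List.length_cons]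
        push_cast; ring
      · by_cases hf : aInnerCount q = (q.length : Int)
        · have hp : pureQ q = true := by simp [pureQ, hf]
          rw [if_neg hz, if_pos ⟨by omega, hf.symm⟩, ih, hp, if_pos rfl, List.length_cons]
          push_cast; ring
        · have hp : pureQ q = false := by simp [pureQ, hz, hf]
          rw [if_neg hz, if_neg (by intro ⟨_, h⟩; exact hf h.symm), ih, hp, if_neg (by simp)]

-- the pure-query count equals the tree length iff every query is pure
lemma pure_count_eq_len_iff (tree : List (List String)) :
    ((tree.filter pureQ).length : Int) = (tree.length : Int) ↔ tree.all pureQ = true := by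
  have : (tree.filter pureQ).length = tree.length ↔ tree.all pureQ = true := by
    induction tree with
    | nil => simp
    | cons q t ih =>
        simp only [List.filter_cons, List.all_cons, Bool.and_eq_true, List.length_cons]
        by_cases hp : pureQ q = true
        · rw [hp, if_pos rfl, List.length_cons]
          simp only [true_and, Nat.succ_inj]
          exact ih
        · have hf : pureQ q = false := by rwa [Bool.not_eq_true] at hp
          rw [hf, if_neg (by simp)]
          have hle := List.length_filter_le pureQ t
          constructor
          · intro h; omega
          · intro ⟨h, _⟩; exact absurd h (by simp)
  constructor
  · intro h; exact this.mp (by exact_mod_cast h)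
  · intro h; exact_mod_cast this.mpr h

-- B's single fold computes the same count and the all-pure flag
lemma b_fold_eq (tree : List (List String)) (n : Int) (b : Bool) :
    tree.foldl (fun (st : Int × Bool) query =>
      let c := bActionCount query
      let qwa := if c > 0 then st.1 + 1 else st.1
      let pure := if 0 < c ∧ c < (query.length : Int) then false else st.2
      (qwa, pure)) (n, b)
      = (n + ((tree.filter hasAct).length : Int), b && tree.all pureQ) := by
  induction tree generalizing n b with
  | nil => simp
  | cons q t ih =>
      simp only [List.foldl_cons, List.filter_cons, List.all_cons]
      have hbc : bActionCount q = aInnerCount q := rfl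
      have h0 := count_nonneg q
      have hl := count_le_len q
      have hpos := count_pos_iff q
      rw [hbc, ih]
      by_cases ha : hasAct q = true
      · have hcpos : 0 < aInnerCount q := hpos.mpr ha
        by_cases hmix : aInnerCount q < (q.length : Int)
        · have hp : pureQ q = false := by simp [pureQ]; omega
          rw [if_pos ha, if_pos hcpos, if_pos ⟨hcpos, hmix⟩, hp, List.length_cons]
          refine Prod.ext ?_ ?_
          · show n + 1 + _ = n + _; push_cast; ring
          · simp
        · have hp : pureQ q = true := by simp [pureQ]; omega
          rw [if_pos ha, if_pos hcpos, if_neg (by intro ⟨_, h⟩; exact hmix h), hp, List.length_cons]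
          refine Prod.ext ?_ ?_
          · show n + 1 + _ = n + _; push_cast; ring
          · simp
      · have hcz : ¬ 0 < aInnerCount q := fun h => ha (hpos.mp h)
        have hp : pureQ q = true := by simp [pureQ]; omega
        rw [if_neg ha, if_neg hcz, if_neg (by intro ⟨h, _⟩; exact hcz h), hp]
        refine Prod.ext rfl ?_
        simp

-- ===== VERDICT (by name: the statement is the Claim_ definition above) =====
theorem is_valid_action_query_py_spec : Claim_equal_is_valid_action_query_py := by
  intro tree _
  unfold Spec_is_valid_action_query_py
  unfold is_valid_action_query_py is_valid_action_query_py_alt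
  rw [first_fold_eq, second_fold_eq, b_fold_eq]
  simp only [zero_add, Bool.true_and]
  by_cases h1 : ((tree.filter hasAct).length : Int) = 1
  · rw [if_pos h1]
    by_cases h2 : tree.all pureQ = true
    · rw [if_pos ((pure_count_eq_len_iff tree).mpr h2), if_pos ⟨h1, h2⟩]
    · rw [if_neg (fun hc => h2 ((pure_count_eq_len_iff tree).mp hc)),
          if_neg (fun hb => h2 hb.2)]
  · rw [if_neg h1, if_neg (fun hb => h1 hb.1)]
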